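-- pv_equiv track=rewrite | github.com/BrainDriveAI/Document-Processing-Service | app/adapters/document_processor/chunking_strategies/optimized.py | _extract_heading_level
-- ===== SOURCE A (Python) =====
-- from typing import List, Dict, Any, Optional
--
-- def _extract_heading_level(section: Dict[str, Any]) -> Optional[int]:
--     """Extract heading level from section"""
--     label = section.get('label', '').lower()
--     heading = section.get('heading', '')
--
--     # Try to extract level from label
--     for i in range(1, 7):
--         if f'h{i}' in label or f'heading{i}' in label:
--             return i
--
--     # Try to infer from heading text patterns
--     if heading and isinstance(heading, str):
--         # Count leading # symbols (markdown style)
--         if heading.startswith('#'):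
--             return min(heading.count('#'), 6)
--
--     return None
-- ===== SOURCE B (Python) =====
-- def _extract_heading_level(section):
--     """Extract heading level from section (single left-to-right scan)."""
--     label = section.get('label', '').lower()
--     best = None
--     rest = label
--     while rest:
--         if rest[0] == 'h':
--             tail = rest[7:] if rest[1:7] == 'eading' else rest[1:]
--             if tail and tail[0].isdigit():
--                 d = ord(tail[0]) - 48
--                 if 1 <= d <= 6 and (best is None or d < best):
--                     best = d
--         rest = rest[1:]
--     if best is not None:
--         return best
--     heading = section.get('heading', '')
--     if heading and isinstance(heading, str) and heading.startswith('#'):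
--         return min(heading.count('#'), 6)
--     return None
-- ===== Notes on version B (the rewrite author's own statement) =====
-- stated objective: alternative
-- what changed: A probes levels 1..6 in order with two substring searches each ('h{i}'/'heading{i}' in label); B makes a single left-to-right scan over the label, recognising 'h<digit>'/'heading<digit>' at each position and keeping the minimum level in 1..6 seen, which equals A's first (lowest) hit; the markdown '#' fallback is unchanged.
import Mathlib
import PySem

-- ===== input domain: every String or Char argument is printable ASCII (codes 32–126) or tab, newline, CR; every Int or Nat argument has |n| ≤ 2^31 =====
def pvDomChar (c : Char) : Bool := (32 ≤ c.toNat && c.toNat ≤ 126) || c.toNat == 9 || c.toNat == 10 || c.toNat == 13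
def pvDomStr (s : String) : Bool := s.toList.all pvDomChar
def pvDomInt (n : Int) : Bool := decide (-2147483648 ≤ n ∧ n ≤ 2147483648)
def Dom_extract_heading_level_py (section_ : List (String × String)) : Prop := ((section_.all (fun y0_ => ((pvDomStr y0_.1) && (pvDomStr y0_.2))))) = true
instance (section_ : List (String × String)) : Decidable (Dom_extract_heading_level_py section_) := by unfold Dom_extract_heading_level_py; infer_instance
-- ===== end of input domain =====

-- B replaces A's six ordered substring probes by one left-to-right scan of the label that keeps the
-- minimum heading level seen; the markdown '#' fallback is unchanged. Objective: a genuinely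
-- different single-pass algorithm of similar cost (no speed claim).

-- ===== PORT A =====
-- 'for i in range(1, 7): if f'h{i}' in label or f'heading{i}' in label: return i'
def aProbe (label : List Char) : List Int → Option Int
  | [] => none
  | i :: rest =>
    if PySem.Chars.isIn ('h' :: PySem.Int.toChars i) label
        || PySem.Chars.isIn ("heading".toList ++ PySem.Int.toChars i) label then
      some i
    else
      aProbe label rest

def extract_heading_level_py (section_ : List (String × String)) : Option Int :=
  let dct := PySem.Dict.ofList section_
  let label := PySem.Chars.lower (dct.getD "label" "").toList
  let heading := (dct.getD "heading" "").toList
  match aProbe label (PySem.List.pyRange 1 7 1) with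
  | some i => some i
  | none =>
    -- 'if heading and isinstance(heading, str)' (isinstance is always true at this type)
    if heading ≠ [] then
      if PySem.Chars.startswith heading ['#'] then
        some (min ((PySem.Chars.count heading ['#'] : Int)) 6)
      else none
    else none

-- ===== PORT B =====
-- Source B's while-loop over the suffixes of label, carrying the minimum level found so far
def bScan : List Char → Option Int → Option Int
  | [], best => best
  | c :: rest, best =>
    bScan rest
      (if c = 'h' then
        -- 'tail = rest[7:] if rest[1:7] == 'eading' else rest[1:]'
        match (if rest.take 6 = "eading".toList then rest.drop 6 else rest) with
        | [] => best
        | d :: _ =>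
          if PySem.Chars.isdigit d then
            let v : Int := (d.toNat : Int) - 48   -- ord(tail[0]) - 48
            if 1 ≤ v ∧ v ≤ 6 then
              match best with
              | none => some v
              | some b => if v < b then some v else some b
            else best
          else best
      else best)

def extract_heading_level_py_alt (section_ : List (String × String)) : Option Int :=
  let dct := PySem.Dict.ofList section_
  let label := PySem.Chars.lower (dct.getD "label" "").toList
  match bScan label none with
  | some b => some b
  | none =>
    let heading := (dct.getD "heading" "").toList
    if heading ≠ [] then
      if PySem.Chars.startswith heading ['#'] then
        some (min ((PySem.Chars.count heading ['#'] : Int)) 6)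
      else none
    else none

-- ===== PRECONDITION & SPEC =====
def Spec_extract_heading_level_py (section_ : List (String × String)) (out : Option Int) : Prop := out = extract_heading_level_py_alt section_
instance (section_ : List (String × String)) (out : Option Int) : Decidable (Spec_extract_heading_level_py section_ out) := by unfold Spec_extract_heading_level_py; infer_instance

-- ===== CLAIM (what is proved, stated in full; the proofs are below) =====
def Claim_equal_extract_heading_level_py : Prop := ∀ (section_ : List (String × String)), Dom_extract_heading_level_py section_ → Spec_extract_heading_level_py section_ (extract_heading_level_py section_)

-- ===== LEMMAS AND PROOFS =====

-- the first level whose pattern occurs, as a function of the six Booleans (A's probe order)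
def gsix (b1 b2 b3 b4 b5 b6 : Bool) : Option Int :=
  if b1 then some 1 else if b2 then some 2 else if b3 then some 3
  else if b4 then some 4 else if b5 then some 5 else if b6 then some 6 else none

-- 'h<d>' or 'heading<d>' occurs in cs
def condAt (d : Char) (cs : List Char) : Bool :=
  PySem.Chars.isIn ['h', d] cs || PySem.Chars.isIn ['h', 'e', 'a', 'd', 'i', 'n', 'g', d] cs

def Gsix (cs : List Char) : Option Int :=
  gsix (condAt '1' cs) (condAt '2' cs) (condAt '3' cs) (condAt '4' cs) (condAt '5' cs) (condAt '6' cs)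

-- minimum of an accumulator and a new candidate, B's tie/update rule
def minOpt : Option Int → Option Int → Option Int
  | best, none => best
  | none, some v => some v
  | some b, some v => if v < b then some v else some b

-- the candidate B's head step contributes at position (c :: rest)
def hdCand (c : Char) (rest : List Char) : Option Int :=
  if c = 'h' then
    match (if rest.take 6 = "eading".toList then rest.drop 6 else rest) with
    | [] => none
    | d :: _ =>
      if PySem.Chars.isdigit d ∧ 1 ≤ (d.toNat : Int) - 48 ∧ (d.toNat : Int) - 48 ≤ 6 then
        some ((d.toNat : Int) - 48)
      else none
  else none

theorem minOpt_none_left (x : Option Int) : minOpt none x = x := by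
  cases x <;> rfl

theorem minOpt_none_right (x : Option Int) : minOpt x none = x := by
  cases x <;> rfl

theorem minOpt_some_some (a b : Int) : minOpt (some a) (some b) = some (min a b) := by
  simp only [minOpt]; split_ifs <;> (congr 1; omega)

theorem minOpt_assoc (x y z : Option Int) : minOpt (minOpt x y) z = minOpt x (minOpt y z) := by
  cases x with
  | none => rw [minOpt_none_left, minOpt_none_left]
  | some a => cases y with
    | none => rw [minOpt_none_right, minOpt_none_left]
    | some b => cases z with
      | none => rw [minOpt_none_right, minOpt_none_right]
      | some c =>
        rw [minOpt_some_some, minOpt_some_some, minOpt_some_some, minOpt_some_some, min_assoc]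

theorem bScan_step (c : Char) (rest : List Char) (best : Option Int) :
    bScan (c :: rest) best = bScan rest (minOpt best (hdCand c rest)) := by
  show bScan rest _ = bScan rest _
  congr 1
  by_cases hc : c = 'h'
  · subst hc
    simp only [hdCand]
    cases h : (if rest.take 6 = "eading".toList then rest.drop 6 else rest) with
    | nil => cases best <;> simp [minOpt]
    | cons d tl =>
      cases best <;> (simp only [if_true]; split_ifs <;> simp only [minOpt]; all_goals
        first | rfl | tauto | (split_ifs <;> rfl))
  · cases best <;> simp only [hdCand, if_neg hc] <;> rfl

theorem isIn_cons (p : List Char) (c : Char) (t : List Char) :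
    PySem.Chars.isIn p (c :: t) = (decide (p <+: (c :: t)) || PySem.Chars.isIn p t) := by
  rcases h : PySem.Chars.isIn p (c :: t) with _ | _
  · rw [PySem.Chars.isIn_eq_false_iff, List.infix_cons_iff] at h
    simp [not_or] at h
    simp [h.1, (PySem.Chars.isIn_eq_false_iff p t).2 h.2]
  · rw [PySem.Chars.isIn_iff_infix, List.infix_cons_iff] at h
    rcases h with h | h
    · simp [h]
    · simp [(PySem.Chars.isIn_iff_infix p t).2 h]

theorem singleton_prefix (d : Char) (t : List Char) : ([d] <+: t) ↔ t[0]? = some d := by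
  cases t <;> simp [List.cons_prefix_cons, eq_comm]

theorem append_singleton_prefix (l : List Char) (d : Char) (t : List Char) :
    (l ++ [d] <+: t) ↔ (t.take l.length = l ∧ t[l.length]? = some d) := by
  induction l generalizing t with
  | nil => cases t <;> simp [List.cons_prefix_cons, eq_comm]
  | cons a l ih =>
    cases t with
    | nil => simp
    | cons b t => simp [List.cons_prefix_cons, ih, eq_comm, and_assoc]

-- the two patterns for level d starting at the head of (c :: t)
theorem h_prefix (d : Char) (c : Char) (t : List Char) :
    (['h', d] <+: (c :: t)) ↔ c = 'h' ∧ t[0]? = some d := by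
  simp [List.cons_prefix_cons, singleton_prefix, eq_comm]

theorem heading_prefix (d : Char) (c : Char) (t : List Char) :
    (['h', 'e', 'a', 'd', 'i', 'n', 'g', d] <+: (c :: t)) ↔
      c = 'h' ∧ t.take 6 = ['e', 'a', 'd', 'i', 'n', 'g'] ∧ t[6]? = some d := by
  have : (['h', 'e', 'a', 'd', 'i', 'n', 'g', d] : List Char)
      = 'h' :: (['e', 'a', 'd', 'i', 'n', 'g'] ++ [d]) := rfl
  rw [this, List.cons_prefix_cons, append_singleton_prefix]
  simp [eq_comm]

-- one digit candidate combined into the six-Boolean minimum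
theorem digit_case (d : Char) (c1 c2 c3 c4 c5 c6 : Bool) :
    gsix (decide (d = '1') || c1) (decide (d = '2') || c2) (decide (d = '3') || c3)
         (decide (d = '4') || c4) (decide (d = '5') || c5) (decide (d = '6') || c6)
    = minOpt
        (if PySem.Chars.isdigit d ∧ 1 ≤ (d.toNat : Int) - 48 ∧ (d.toNat : Int) - 48 ≤ 6 then
           some ((d.toNat : Int) - 48)
         else none)
        (gsix c1 c2 c3 c4 c5 c6) := by
  by_cases h1 : d = '1'
  · subst h1; revert c1 c2 c3 c4 c5 c6; decide
  by_cases h2 : d = '2'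
  · subst h2; revert c1 c2 c3 c4 c5 c6; decide
  by_cases h3 : d = '3'
  · subst h3; revert c1 c2 c3 c4 c5 c6; decide
  by_cases h4 : d = '4'
  · subst h4; revert c1 c2 c3 c4 c5 c6; decide
  by_cases h5 : d = '5'
  · subst h5; revert c1 c2 c3 c4 c5 c6; decide
  by_cases h6 : d = '6'
  · subst h6; revert c1 c2 c3 c4 c5 c6; decide
  have hcond : ¬ (PySem.Chars.isdigit d ∧ 1 ≤ (d.toNat : Int) - 48 ∧ (d.toNat : Int) - 48 ≤ 6) := by
    rintro ⟨-, hlo, hhi⟩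
    have : d.toNat = 49 ∨ d.toNat = 50 ∨ d.toNat = 51 ∨ d.toNat = 52 ∨ d.toNat = 53 ∨ d.toNat = 54 := by omega
    have hofnat := Char.ofNat_toNat d
    rcases this with h | h | h | h | h | h
    · rw [h] at hofnat; exact h1 (by rw [← hofnat])
    · rw [h] at hofnat; exact h2 (by rw [← hofnat])
    · rw [h] at hofnat; exact h3 (by rw [← hofnat])
    · rw [h] at hofnat; exact h4 (by rw [← hofnat])
    · rw [h] at hofnat; exact h5 (by rw [← hofnat])
    · rw [h] at hofnat; exact h6 (by rw [← hofnat])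
  rw [if_neg hcond, minOpt_none_left]
  simp [h1, h2, h3, h4, h5, h6]

theorem condAt_cons (d : Char) (c : Char) (t : List Char) :
    condAt d (c :: t)
      = (decide (['h', d] <+: (c :: t)) || decide (['h', 'e', 'a', 'd', 'i', 'n', 'g', d] <+: (c :: t))
          || condAt d t) := by
  simp only [condAt, isIn_cons]
  cases decide (['h', d] <+: (c :: t)) <;>
    cases decide (['h', 'e', 'a', 'd', 'i', 'n', 'g', d] <+: (c :: t)) <;>
    cases PySem.Chars.isIn ['h', d] t <;> cases PySem.Chars.isIn ['h', 'e', 'a', 'd', 'i', 'n', 'g', d] t <;> rfl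

theorem Gsix_cons (c : Char) (t : List Char) : Gsix (c :: t) = minOpt (hdCand c t) (Gsix t) := by
  by_cases hc : c = 'h'
  · subst hc
    by_cases he : t.take 6 = "eading".toList
    · -- heading-shaped head: the single 'h<d>' probe cannot fire (t starts with 'e')
      have ht0 : t[0]? = some 'e' := by
        have := congrArg (fun l => l[0]?) he
        simpa using this
      have huse : ∀ d : Char, d ≠ 'e' → condAt d ('h' :: t) = (decide (t[6]? = some d) || condAt d t) := by
        intro d hd
        rw [condAt_cons]
        have e1 : decide (['h', d] <+: 'h' :: t) = false := by
          rw [decide_eq_false_iff_not, h_prefix]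
          rintro ⟨-, h0⟩
          rw [ht0] at h0
          exact hd (by injection h0 with h'; exact h'.symm)
        have e2 : decide ((['h', 'e', 'a', 'd', 'i', 'n', 'g', d] : List Char) <+: 'h' :: t)
            = decide (t[6]? = some d) := by
          apply decide_eq_decide.mpr
          rw [heading_prefix]
          simp [he]
        rw [e1, e2, Bool.false_or]
      rw [show Gsix ('h' :: t)
            = gsix (condAt '1' ('h' :: t)) (condAt '2' ('h' :: t)) (condAt '3' ('h' :: t))
                   (condAt '4' ('h' :: t)) (condAt '5' ('h' :: t)) (condAt '6' ('h' :: t)) from rfl]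
      rw [huse '1' (by decide), huse '2' (by decide), huse '3' (by decide),
          huse '4' (by decide), huse '5' (by decide), huse '6' (by decide)]
      cases h6 : t[6]? with
      | none =>
        have hdrop : t.drop 6 = [] := by
          cases hd : t.drop 6 with
          | nil => rfl
          | cons x xs =>
            exfalso
            have : t[6]? = some x := by
              rw [← List.head?_drop, hd]; rfl
            rw [h6] at this; cases this
        simp [hdCand, he, hdrop, minOpt_none_left, Gsix]
      | some d =>
        have hdrop : ∃ xs, t.drop 6 = d :: xs := by
          cases hd : t.drop 6 with
          | nil =>
            exfalso
            have : t[6]? = (none : Option Char) := by rw [← List.head?_drop, hd]; rfl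
            rw [h6] at this; cases this
          | cons x xs =>
            have hx : t[6]? = some x := by rw [← List.head?_drop, hd]; rfl
            rw [h6] at hx
            injection hx with hx
            exact ⟨xs, by rw [hx]⟩
        obtain ⟨xs, hdrop⟩ := hdrop
        simp only [Option.some.injEq]
        simp only [hdCand, he, hdrop]
        have := digit_case d (condAt '1' t) (condAt '2' t) (condAt '3' t)
          (condAt '4' t) (condAt '5' t) (condAt '6' t)
        simp only [Gsix]
        rw [show ∀ d' : Char, decide (d = d') = decide (d' = d) from fun d' => by simp [eq_comm]] at this ⊢
        exact this
    · -- plain 'h' head: only 'h<d>' can fire here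
      have hwrap : ¬ (t.take 6 = (['e', 'a', 'd', 'i', 'n', 'g'] : List Char)) := by
        intro h; exact he (by rw [h]; rfl)
      have huse : ∀ d : Char, condAt d ('h' :: t) = (decide (t[0]? = some d) || condAt d t) := by
        intro d
        rw [condAt_cons]
        have e1 : decide (['h', d] <+: 'h' :: t) = decide (t[0]? = some d) := by
          apply decide_eq_decide.mpr
          rw [h_prefix]
          simp
        have e2 : decide ((['h', 'e', 'a', 'd', 'i', 'n', 'g', d] : List Char) <+: 'h' :: t) = false := by
          rw [decide_eq_false_iff_not, heading_prefix]
          rintro ⟨-, h', -⟩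
          exact hwrap h'
        rw [e1, e2]
        cases decide (t[0]? = some d) <;> cases condAt d t <;> rfl
      rw [show Gsix ('h' :: t)
            = gsix (condAt '1' ('h' :: t)) (condAt '2' ('h' :: t)) (condAt '3' ('h' :: t))
                   (condAt '4' ('h' :: t)) (condAt '5' ('h' :: t)) (condAt '6' ('h' :: t)) from rfl]
      rw [huse '1', huse '2', huse '3', huse '4', huse '5', huse '6']
      cases t with
      | nil => simp [hdCand, minOpt_none_left, Gsix]
      | cons d xs =>
        have : ∀ d' : Char, decide ((d :: xs)[0]? = some d') = decide (d = d') := by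
          intro d'; simp
        rw [this '1', this '2', this '3', this '4', this '5', this '6']
        simp only [hdCand, if_neg he]
        have := digit_case d (condAt '1' (d :: xs)) (condAt '2' (d :: xs)) (condAt '3' (d :: xs))
          (condAt '4' (d :: xs)) (condAt '5' (d :: xs)) (condAt '6' (d :: xs))
        simp only [Gsix]
        rw [show ∀ d' : Char, decide (d = d') = decide (d' = d) from fun d' => by simp [eq_comm]] at this ⊢
        exact this
  · -- head is not 'h': no candidate at this position
    have huse : ∀ d : Char, condAt d (c :: t) = condAt d t := by
      intro d
      rw [condAt_cons]
      have e1 : decide (['h', d] <+: c :: t) = false := by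
        rw [decide_eq_false_iff_not, h_prefix]
        rintro ⟨h', -⟩; exact hc h'
      have e2 : decide ((['h', 'e', 'a', 'd', 'i', 'n', 'g', d] : List Char) <+: c :: t) = false := by
        rw [decide_eq_false_iff_not, heading_prefix]
        rintro ⟨h', -⟩; exact hc h'
      rw [e1, e2]
      rfl
    simp only [Gsix, huse, hdCand, if_neg hc, minOpt_none_left]

theorem bScan_eq (cs : List Char) (best : Option Int) : bScan cs best = minOpt best (Gsix cs) := by
  induction cs generalizing best with
  | nil =>
    have : Gsix [] = none := by decide
    rw [this]; cases best <;> rfl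
  | cons c t ih =>
    rw [bScan_step, ih, Gsix_cons, ← minOpt_assoc]

theorem probeA_eq (cs : List Char) : aProbe cs (PySem.List.pyRange 1 7 1) = Gsix cs := by
  rw [show PySem.List.pyRange 1 7 1 = [1, 2, 3, 4, 5, 6] from by decide]
  rfl

-- ===== VERDICT (by name: the statement is the Claim_ definition above) =====
theorem extract_heading_level_py_spec : Claim_equal_extract_heading_level_py := by
  intro section_ _
  unfold Spec_extract_heading_level_py
  show extract_heading_level_py section_ = extract_heading_level_py_alt section_
  simp only [extract_heading_level_py, extract_heading_level_py_alt]
  rw [probeA_eq, bScan_eq, minOpt_none_left]
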